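-- pv_equiv track=rewrite | github.com/wasd314/consecutive-power-sum | cubic/sol1-py/sol1-py.py | solve
-- ===== SOURCE A (Python) =====
-- def solve(n: int):
--     cube = []
--     for i in range(n + 1):
--         if i * i * i <= n:
--             cube.append(i * i * i)
--         else:
--             break
--     # cube[i] = i**3
--
--     c = len(cube)
--     acc = [0] * (c + 1)
--     for i in range(c):
--         acc[i + 1] = acc[i] + cube[i]
--     # acc[i] = sum(j**3 for j < i)
--     # acc[i + 1] = sum(j**3 for j <= i)
--
--     right = {acc[i + 1]: i for i in range(1, c)}
--     ans = []
--     for l in range(1, c + 1):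
--         r = right.get(acc[l] + n, -1)
--         if r != -1:
--             ans.append((l, r))
--     ans.sort()
--     return ans
-- ===== SOURCE B (Python) =====
-- def solve(n: int):
--     # two-pointer sliding window over the positive cubes; emits pairs already in
--     # sorted order, no prefix-sum list, no dict, no final sort
--     m = 0
--     while (m + 1) * (m + 1) * (m + 1) <= n:
--         m += 1
--     res = []
--     l, s = 1, 0
--     for r in range(1, m + 1):
--         s += r * r * r
--         while s > n and l <= r:
--             s -= l * l * l
--             l += 1
--         if s == n and l <= r:
--             res.append((l, r))
--     return res
-- ===== Notes on version B (the rewrite author's own statement) =====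
-- stated objective: alternative
-- what changed: Replaces the prefix-sum array + dict-of-suffix-ends + final sort with a two-pointer sliding window over the positive cubes up to the largest cube bounded by n, maintaining a running window sum and emits the ranges directly in sorted order.
import Mathlib
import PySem

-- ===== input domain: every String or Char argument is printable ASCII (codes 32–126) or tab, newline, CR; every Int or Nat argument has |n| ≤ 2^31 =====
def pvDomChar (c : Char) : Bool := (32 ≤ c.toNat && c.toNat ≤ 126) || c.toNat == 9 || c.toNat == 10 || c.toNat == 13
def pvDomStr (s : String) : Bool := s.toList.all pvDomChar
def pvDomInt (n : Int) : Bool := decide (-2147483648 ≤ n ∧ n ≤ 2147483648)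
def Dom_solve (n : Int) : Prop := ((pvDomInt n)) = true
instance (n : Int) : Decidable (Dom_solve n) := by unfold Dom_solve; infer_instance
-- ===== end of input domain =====

-- B replaces prefix sums + dict + sort by a two-pointer sliding window emitting the
-- same ranges directly in sorted order (objective: alternative, same asymptotic cost).

-- ===== PORT A =====
-- 'for i in range(n+1): if i*i*i <= n: cube.append(i*i*i) else: break'
-- (fuel = number of remaining range items; reaching fuel 0 = range exhausted)
def cubeLoop (n : Int) : Nat → Int → List Int
  | 0, _ => []
  | f + 1, i => if i * i * i ≤ n then i * i * i :: cubeLoop n f (i + 1) else []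

-- 'for i in range(c): acc[i+1] = acc[i] + cube[i]' — builds acc[1..c] from a running value
def accLoop : List Int → Int → List Int
  | [], _ => []
  | x :: xs, cur => (cur + x) :: accLoop xs (cur + x)

def solve (n : Int) : List (Int × Int) :=
  let cube := cubeLoop n (n + 1).toNat 0
  let c : Int := cube.length
  let acc : List Int := 0 :: accLoop cube 0
  -- acc[i+1] / acc[l]: the index is always in range, so pyGetD's default is never used
  let right : PySem.Dict Int Int :=
    (PySem.List.pyRange 1 c 1).foldl
      (fun d i => d.insert (PySem.List.pyGetD acc (i + 1) 0) i) PySem.Dict.empty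
  let ans : List (Int × Int) :=
    (PySem.List.pyRange 1 (c + 1) 1).foldl
      (fun ans l =>
        let r := right.getD (PySem.List.pyGetD acc l 0 + n) (-1)
        if r ≠ -1 then ans ++ [(l, r)] else ans) []
  PySem.List.sorted2 ans (·.1) (·.2)

-- ===== PORT B =====
-- 'while (m+1)*(m+1)*(m+1) <= n: m += 1'  (fuel n.toNat+1 always suffices: m stays ≤ n)
def findM (n : Int) : Nat → Int → Int
  | 0, m => m
  | f + 1, m => if (m + 1) * (m + 1) * (m + 1) ≤ n then findM n f (m + 1) else m

-- 'while s > n and l <= r: s -= l*l*l; l += 1'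
def shrink (n r : Int) (l s : Int) : Int × Int :=
  if s > n ∧ l ≤ r then shrink n r (l + 1) (s - l * l * l) else (l, s)
termination_by (r + 1 - l).toNat
decreasing_by omega

-- 'for r in range(1, m+1): s += r*r*r; <shrink>; if s == n and l <= r: res.append((l, r))'
def mainLoop (n : Int) : List Int → Int → Int → List (Int × Int) → List (Int × Int)
  | [], _, _, res => res
  | r :: rs, l, s, res =>
    let p := shrink n r l (s + r * r * r)
    if p.2 = n ∧ p.1 ≤ r then mainLoop n rs p.1 p.2 (res ++ [(p.1, r)])
    else mainLoop n rs p.1 p.2 res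

def solve_alt (n : Int) : List (Int × Int) :=
  let m := findM n (n.toNat + 1) 0
  mainLoop n (PySem.List.pyRange 1 (m + 1) 1) 1 0 []

-- ===== PRECONDITION & SPEC =====
def Spec_solve (n : Int) (out : List (Int × Int)) : Prop := out = solve_alt n
instance (n : Int) (out : List (Int × Int)) : Decidable (Spec_solve n out) := by unfold Spec_solve; infer_instance

-- ===== CLAIM (what is proved, stated in full; the proofs are below) =====
def Claim_equal_solve : Prop := ∀ (n : Int), Dom_solve n → Spec_solve n (solve n)

-- ===== LEMMAS AND PROOFS =====

lemma cube_le_cube {a b : Int} (ha : 0 ≤ a) (h : a ≤ b) : a * a * a ≤ b * b * b := by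
  have h1 : a * a ≤ b * b := mul_le_mul h h ha (ha.trans h)
  exact mul_le_mul h1 h ha (mul_nonneg (ha.trans h) (ha.trans h))

lemma le_cube {a : Int} (ha : 0 ≤ a) : a ≤ a * a * a := by
  have h1 : a = 0 ∨ 1 ≤ a := by omega
  rcases h1 with h1 | h1
  · simp [h1]
  · nlinarith

-- sum of the first k cubes
def accN : Nat → Int
  | 0 => 0
  | k + 1 => accN k + (k : Int) * (k : Int) * (k : Int)

def accI (i : Int) : Int := accN i.toNat

lemma accN_mono : ∀ {j k : Nat}, j ≤ k → accN j ≤ accN k := by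
  intro j k
  induction k with
  | zero =>
    intro h
    have hj : j = 0 := by omega
    subst hj; exact le_refl _
  | succ k ih =>
    intro h
    have hcube : (0:Int) ≤ (k : Int) * (k : Int) * (k : Int) := by positivity
    rcases Nat.lt_or_ge j (k + 1) with h' | h'
    · have := ih (by omega)
      simp only [accN]; omega
    · have hj : j = k + 1 := by omega
      subst hj; exact le_refl _

lemma accN_strict : ∀ {j k : Nat}, 1 ≤ j → j < k → accN j < accN k := by
  intro j k h1
  induction k with
  | zero => omega
  | succ k ih =>
    intro h2
    have hk1 : 1 ≤ k := by omega
    have hcube : (1:Int) ≤ (k : Int) * (k : Int) * (k : Int) := by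
      have h3 : (1:Int) ≤ (k:Int) := by exact_mod_cast hk1
      nlinarith
    rcases Nat.lt_or_ge j k with h' | h'
    · have := ih h'
      simp only [accN]; omega
    · have hj : j = k := by omega
      subst hj; simp only [accN]; omega

lemma accI_succ {i : Int} (h : 0 ≤ i) : accI (i + 1) = accI i + i * i * i := by
  unfold accI
  have h1 : (i + 1).toNat = i.toNat + 1 := by omega
  have h2 : ((i.toNat : Int)) = i := by omega
  rw [h1]
  simp only [accN, h2]

lemma accI_mono {i j : Int} (h : i ≤ j) : accI i ≤ accI j :=
  accN_mono (by omega)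

lemma accI_strict {i j : Int} (h1 : 1 ≤ i) (hij : i < j) : accI i < accI j :=
  accN_strict (by omega) (by omega)

lemma accI_inj {i j : Int} (h1 : 1 ≤ i) (h2 : 1 ≤ j) (h : accI i = accI j) : i = j := by
  rcases lt_trichotomy i j with h' | h' | h'
  · exact absurd h (ne_of_lt (accI_strict h1 h'))
  · exact h'
  · exact absurd h.symm (ne_of_lt (accI_strict h2 h'))

lemma accI_one : accI 1 = 0 := rfl

-- the pair predicate: (l, r) is a reported range for n (n ≥ 1, cubes l^3 + … + r^3 = n)
def Ppair (n : Int) (p : Int × Int) : Prop :=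
  1 ≤ p.1 ∧ p.1 ≤ p.2 ∧ p.2 * p.2 * p.2 ≤ n ∧ accI (p.2 + 1) - accI p.1 = n

lemma Ppair_cross {n : Int} {p q : Int × Int} (hp : Ppair n p) (hq : Ppair n q)
    (h : p.2 < q.2) : p.1 < q.1 := by
  obtain ⟨hp1, hp2, hp3, hp4⟩ := hp
  obtain ⟨hq1, hq2, hq3, hq4⟩ := hq
  by_contra hle
  push_neg at hle
  have h1 : accI q.1 ≤ accI p.1 := accI_mono hle
  have h2 : accI (p.2 + 1) < accI (q.2 + 1) := accI_strict (by omega) (by omega)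
  omega

-- ---------- findM ----------
lemma findM_go {n : Int} : ∀ (f : Nat) (m0 : Int), 0 ≤ m0 → m0 * m0 * m0 ≤ n →
    n - m0 < f →
    0 ≤ findM n f m0 ∧ (findM n f m0) * (findM n f m0) * (findM n f m0) ≤ n ∧
      n < (findM n f m0 + 1) * (findM n f m0 + 1) * (findM n f m0 + 1) := by
  intro f
  induction f with
  | zero =>
    intro m0 h0 h1 h2
    simp only [findM]
    refine ⟨h0, h1, ?_⟩
    have : m0 ≤ (m0 + 1) * (m0 + 1) * (m0 + 1) := by nlinarith
    omega
  | succ f ih =>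
    intro m0 h0 h1 h2
    simp only [findM]
    split
    · exact ih (m0 + 1) (by omega) (by assumption) (by omega)
    · refine ⟨h0, h1, by omega⟩

lemma M_spec {n : Int} (hn : 1 ≤ n) :
    1 ≤ findM n (n.toNat + 1) 0 ∧
    (findM n (n.toNat + 1) 0) * (findM n (n.toNat + 1) 0) * (findM n (n.toNat + 1) 0) ≤ n ∧
    n < (findM n (n.toNat + 1) 0 + 1) * (findM n (n.toNat + 1) 0 + 1) * (findM n (n.toNat + 1) 0 + 1) := by
  have h := findM_go (n := n) (n.toNat + 1) 0 (by omega) (by omega) (by omega)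
  obtain ⟨h0, h1, h2⟩ := h
  refine ⟨?_, h1, h2⟩
  by_contra h
  push_neg at h
  interval_cases (findM n (n.toNat + 1) 0) <;> omega

-- ---------- A side: cube list ----------
lemma cubeLoop_eq {n M : Int} (h1 : 1 ≤ M) (h2 : M * M * M ≤ n)
    (h3 : n < (M + 1) * (M + 1) * (M + 1)) :
    ∀ (f : Nat) (k : Nat), (k : Int) ≤ M + 1 → M + 1 - (k : Int) ≤ (f : Int) →
      cubeLoop n f k =
        (List.range' k (M + 1 - (k : Int)).toNat).map
          (fun i : Nat => (i : Int) * (i : Int) * (i : Int)) := by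
  intro f
  induction f with
  | zero =>
    intro k hk hf
    have h0 : (M + 1 - (k : Int)).toNat = 0 := by omega
    simp [cubeLoop, h0]
  | succ f ih =>
    intro k hk hf
    rcases lt_or_ge (k : Int) (M + 1) with h' | h'
    · have hcond : (k : Int) * (k : Int) * (k : Int) ≤ n :=
        le_trans (cube_le_cube (by positivity) (by omega)) h2
      have hcast : ((k : Int) + 1) = ((k + 1 : Nat) : Int) := by push_cast; ring
      have hts : (M + 1 - (k : Int)).toNat = (M + 1 - ((k + 1 : Nat) : Int)).toNat + 1 := by
        push_cast; omega
      rw [hts, List.range'_succ, List.map_cons]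
      simp only [cubeLoop, if_pos hcond]
      rw [← ih (k + 1) (by push_cast; omega) (by push_cast; omega), hcast]
    · have hkeq : (k : Int) = M + 1 := by omega
      have hcond : ¬ ((k : Int) * (k : Int) * (k : Int) ≤ n) := by rw [hkeq]; omega
      have h0 : (M + 1 - (k : Int)).toNat = 0 := by omega
      simp [cubeLoop, hcond, h0]

-- ---------- A side: acc list ----------
lemma accLoop_eq : ∀ (j k : Nat),
    accLoop ((List.range' k j).map (fun i : Nat => (i : Int) * (i : Int) * (i : Int))) (accN k) =
      (List.range' (k + 1) j).map (fun i : Nat => accN i) := by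
  intro j
  induction j with
  | zero => intro k; simp [accLoop]
  | succ j ih =>
    intro k
    rw [List.range'_succ, List.range'_succ, List.map_cons, List.map_cons]
    simp only [accLoop]
    have hstep : accN k + (k : Int) * (k : Int) * (k : Int) = accN (k + 1) := rfl
    rw [hstep, ih (k + 1)]

-- ---------- B side: shrink ----------
lemma shrink_spec (n r : Int) : ∀ (l s : Int), 1 ≤ l → l ≤ r + 1 →
    s = accI (r + 1) - accI l →
    l ≤ (shrink n r l s).1 ∧ (shrink n r l s).1 ≤ r + 1 ∧
      (shrink n r l s).2 = accI (r + 1) - accI (shrink n r l s).1 ∧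
      ((shrink n r l s).2 ≤ n ∨ (shrink n r l s).1 = r + 1) ∧
      ((shrink n r l s).1 = l ∨ n < accI (r + 1) - accI ((shrink n r l s).1 - 1)) := by
  intro l s
  induction l, s using shrink.induct n r with
  | case1 l s hcond ih =>
    intro h1 h2 hs
    have hl : l ≤ r := hcond.2
    rw [shrink, if_pos hcond]
    have hs' : s - l * l * l = accI (r + 1) - accI (l + 1) := by
      rw [show accI (l + 1) = accI l + l * l * l from accI_succ (by omega)]; omega
    obtain ⟨i1, i2, i3, i4, i5⟩ := ih (by omega) (by omega) hs'
    refine ⟨by omega, i2, i3, i4, ?_⟩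
    rcases i5 with h' | h'
    · right
      have hl1 : (l + 1 : Int) - 1 = l := by ring
      rw [h', hl1, ← hs]
      exact hcond.1
    · right; exact h'
  | case2 l s hcond =>
    intro h1 h2 hs
    rw [shrink, if_neg hcond]
    push_neg at hcond
    refine ⟨le_refl l, h2, hs, ?_, Or.inl rfl⟩
    by_cases h' : s ≤ n
    · exact Or.inl h'
    · exact Or.inr (by have := hcond (by omega); omega)

-- ---------- B side: main loop invariant ----------
lemma Ppair_r_le {n M : Int} (hM0 : 0 ≤ M) (hM3 : n < (M + 1) * (M + 1) * (M + 1))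
    {p : Int × Int} (hp : Ppair n p) : p.2 ≤ M := by
  obtain ⟨h1, h2, h3, _⟩ := hp
  by_contra hgt
  push_neg at hgt
  have := cube_le_cube (show (0:Int) ≤ M + 1 by omega) (show M + 1 ≤ p.2 by omega)
  omega

lemma mainLoop_inv {n M : Int} (hM1 : 1 ≤ M) (hM2 : M * M * M ≤ n)
    (hM3 : n < (M + 1) * (M + 1) * (M + 1)) (hn : 1 ≤ n) :
    ∀ (fuel : Nat) (r0 l s : Int) (res : List (Int × Int)),
      M + 1 - r0 ≤ (fuel : Int) → 1 ≤ r0 → r0 ≤ M + 1 → 1 ≤ l → l ≤ r0 →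
      s = accI r0 - accI l →
      (l = 1 ∨ n < accI r0 - accI (l - 1)) →
      (∀ p, p ∈ res ↔ Ppair n p ∧ p.2 < r0) →
      res.Pairwise (fun p q => p.2 < q.2) →
      (∀ p, p ∈ mainLoop n (PySem.List.pyRange r0 (M + 1) 1) l s res ↔ Ppair n p) ∧
        (mainLoop n (PySem.List.pyRange r0 (M + 1) 1) l s res).Pairwise (fun p q => p.2 < q.2) := by
  intro fuel
  induction fuel with
  | zero =>
    intro r0 l s res hf h1 h2 h3 h4 hs hmin hres hpw
    have hr0 : r0 = M + 1 := by omega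
    subst hr0
    rw [PySem.List.pyRange_one_eq_nil (le_refl _)]
    simp only [mainLoop]
    refine ⟨?_, hpw⟩
    intro p
    rw [hres p]
    constructor
    · tauto
    · intro hp
      exact ⟨hp, by have := Ppair_r_le (show (0:Int) ≤ M by omega) hM3 hp; omega⟩
  | succ fuel ih =>
    intro r0 l s res hf h1 h2 h3 h4 hs hmin hres hpw
    rcases eq_or_lt_of_le h2 with hr0 | hr0
    · subst hr0
      rw [PySem.List.pyRange_one_eq_nil (le_refl _)]
      simp only [mainLoop]
      refine ⟨?_, hpw⟩
      intro p
      rw [hres p]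
      constructor
      · tauto
      · intro hp
        exact ⟨hp, by have := Ppair_r_le (show (0:Int) ≤ M by omega) hM3 hp; omega⟩
    · rw [PySem.List.pyRange_one_cons hr0]
      simp only [mainLoop]
      have hs1 : s + r0 * r0 * r0 = accI (r0 + 1) - accI l := by
        rw [show accI (r0 + 1) = accI r0 + r0 * r0 * r0 from accI_succ (by omega)]; omega
      obtain ⟨i1, i2, i3, i4, i5⟩ := shrink_spec n r0 l (s + r0 * r0 * r0) h3 (by omega) hs1
      set l1 := (shrink n r0 l (s + r0 * r0 * r0)).1 with hl1def
      set s2 := (shrink n r0 l (s + r0 * r0 * r0)).2 with hs2def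
      have hmin' : l1 = 1 ∨ n < accI (r0 + 1) - accI (l1 - 1) := by
        rcases i5 with h' | h'
        · rcases hmin with h'' | h''
          · left; omega
          · right
            rw [h']
            have := accI_mono (show r0 ≤ r0 + 1 by omega)
            omega
        · right; exact h'
      -- every witnessing pair at r0 forces the emission test, and is emitted verbatim
      have hkey : ∀ p : Int × Int, Ppair n p → p.2 = r0 → s2 = n ∧ l1 ≤ r0 ∧ p.1 = l1 := by
        intro p hp hpr
        obtain ⟨q1, q2, q3, q4⟩ := hp
        rw [hpr] at q2 q4
        have hl1r : l1 ≤ r0 := by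
          by_contra hgt
          push_neg at hgt
          have hl1e : l1 = r0 + 1 := by omega
          have h5 : l1 ≠ l := by omega
          rcases i5 with h' | h'
          · omega
          · rw [hl1e] at h'
            have h6 : (r0 + 1 : Int) - 1 = r0 := by ring
            rw [h6] at h'
            have := accI_mono (show p.1 ≤ r0 by omega)
            omega
        have hs2n : s2 = n := by
          rcases i4 with h' | h'
          · rcases eq_or_lt_of_le h' with h'' | h''
            · exact h''
            · exfalso
              -- s2 < n: accI p.1 < accI l1 so p.1 < l1, then minimality is contradicted
              have hpl : p.1 < l1 := by
                by_contra hge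
                push_neg at hge
                have := accI_mono (show l1 ≤ p.1 by omega)
                omega
              have hl2 : 2 ≤ l1 := by omega
              have hmin2 : n < accI (r0 + 1) - accI (l1 - 1) := by
                rcases hmin' with h'' | h''
                · omega
                · exact h''
              have := accI_mono (show p.1 ≤ l1 - 1 by omega)
              omega
          · omega
        refine ⟨hs2n, hl1r, ?_⟩
        apply accI_inj q1 (by omega)
        have : accI l1 = accI (r0 + 1) - s2 := by omega
        omega
      have hnext : ∀ (res' : List (Int × Int)),
          (∀ p, p ∈ res' ↔ Ppair n p ∧ p.2 < r0 + 1) →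
          res'.Pairwise (fun p q => p.2 < q.2) →
          (∀ p, p ∈ mainLoop n (PySem.List.pyRange (r0 + 1) (M + 1) 1) l1 s2 res' ↔ Ppair n p) ∧
            (mainLoop n (PySem.List.pyRange (r0 + 1) (M + 1) 1) l1 s2 res').Pairwise
              (fun p q => p.2 < q.2) := by
        intro res' hres' hpw'
        exact ih (r0 + 1) l1 s2 res' (by push_cast at hf ⊢; omega) (by omega) (by omega)
          (by omega) (by omega) i3 hmin' hres' hpw'
      by_cases htest : s2 = n ∧ l1 ≤ r0
      · rw [if_pos htest]
        have hpp : Ppair n (l1, r0) := by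
          refine ⟨by omega, htest.2, ?_, by simp only []; omega⟩
          have := cube_le_cube (show (0:Int) ≤ r0 by omega) (show r0 ≤ M by omega)
          simp only []
          omega
        apply hnext
        · intro p
          rw [List.mem_append]
          constructor
          · intro hm
            rcases hm with hm | hm
            · have := (hres p).mp hm
              exact ⟨this.1, by omega⟩
            · simp at hm
              subst hm
              exact ⟨hpp, by simp only []; omega⟩
          · rintro ⟨hp, hp2⟩
            rcases lt_or_ge p.2 r0 with h' | h'
            · exact Or.inl ((hres p).mpr ⟨hp, h'⟩)
            · have hp2r : p.2 = r0 := by omega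
              obtain ⟨_, _, hfst⟩ := hkey p hp hp2r
              right
              simp only [List.mem_singleton]
              exact Prod.ext hfst hp2r
        · rw [List.pairwise_append]
          refine ⟨hpw, List.pairwise_singleton _ _, ?_⟩
          intro a ha b hb
          simp at hb
          subst hb
          have := (hres a).mp ha
          simp only []
          omega
      · rw [if_neg htest]
        apply hnext
        · intro p
          rw [hres p]
          constructor
          · rintro ⟨hp, h'⟩
            exact ⟨hp, by omega⟩
          · rintro ⟨hp, h'⟩
            refine ⟨hp, ?_⟩
            rcases lt_or_ge p.2 r0 with h'' | h''
            · exact h''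
            · exfalso
              have hp2r : p.2 = r0 := by omega
              obtain ⟨ha, hb, _⟩ := hkey p hp hp2r
              exact htest ⟨ha, hb⟩
        · exact hpw

-- ---------- sorted2 of a strictly fst-increasing list ----------
lemma foldl_insertBy_eq (before : (Int × Int) → (Int × Int) → Bool) :
    ∀ (xs acc : List (Int × Int)),
      xs.Pairwise (fun a b => before b a = false) →
      (∀ x ∈ xs, ∀ y ∈ acc, before x y = false) →
      xs.foldl (fun acc x => PySem.List.insertBy before x acc) acc = acc ++ xs := by
  intro xs
  induction xs with
  | nil => intro acc _ _; simp
  | cons x xs ih =>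
    intro acc hpw hcr
    obtain ⟨hx, hpw'⟩ := List.pairwise_cons.mp hpw
    simp only [List.foldl_cons]
    rw [PySem.List.insertBy_of_forall_not_before before x acc
      (fun y hy => hcr x (by simp) y hy)]
    rw [ih (acc ++ [x]) hpw' ?_]
    · simp
    · intro z hz y hy
      rcases List.mem_append.mp hy with h' | h'
      · exact hcr z (by simp [hz]) y h'
      · simp at h'; subst h'; exact hx z hz
  
lemma sorted2_fst_lt_eq_self (xs : List (Int × Int))
    (h : xs.Pairwise (fun p q => p.1 < q.1)) :
    PySem.List.sorted2 xs (·.1) (·.2) false = xs := by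
  show xs.foldl (fun acc x => PySem.List.insertBy _ x acc) [] = xs
  rw [foldl_insertBy_eq _ xs []
    (by
      refine h.imp ?_
      intro a b hab
      have hd1 : decide (b.1 < a.1) = false := by simp; omega
      have hd2 : decide (a.1 < b.1) = true := by simp [hab]
      simp [hd1, hd2])
    (by intro x _ y hy; simp at hy)]
  simp

-- ===== VERDICT (by name: the statement is the Claim_ definition above) =====
theorem solve_spec : Claim_equal_solve := by
  unfold Claim_equal_solve
  intro n _
  show solve n = solve_alt n
  rcases lt_trichotomy n 0 with hn | hn | hn
  · -- n < 0: both sides are []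
    have h0 : (n + 1).toNat = 0 := by omega
    have h1 : n.toNat = 0 := by omega
    have hneg : ¬ ((0 + 1) * (0 + 1) * (0 + 1) ≤ n) := by omega
    simp only [solve, solve_alt, h0, h1, cubeLoop, accLoop, findM, hneg, if_false,
      List.length_nil, Nat.cast_zero]
    simp [mainLoop, PySem.List.sorted2]
  · subst hn
    decide
  · -- 1 ≤ n
    replace hn : 1 ≤ n := hn
    obtain ⟨hM1, hM2, hM3⟩ := M_spec hn
    set M := findM n (n.toNat + 1) 0 with hMdef
    have hM0 : (0:Int) ≤ M := by omega
    have hMn : M ≤ n := le_trans (le_cube hM0) hM2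
    set KM := M.toNat with hKMdef
    have hKMc : (KM : Int) = M := by omega
    -- A's cube list is [0^3, …, M^3]
    have hcube : cubeLoop n (n + 1).toNat 0 =
        (List.range' 0 (KM + 1)).map (fun i : Nat => (i : Int) * (i : Int) * (i : Int)) := by
      have h := cubeLoop_eq hM1 hM2 hM3 (n + 1).toNat 0 (by simp; omega) (by simp; omega)
      simp only [Nat.cast_zero, sub_zero] at h
      rw [show (M + 1).toNat = KM + 1 by omega] at h
      exact h
    have hlen : (((cubeLoop n (n + 1).toNat 0).length : Int)) = M + 1 := by
      rw [hcube]
      simp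
      omega
    -- A's prefix-sum list is [accN 0, …, accN (M+1)]
    have haccL : (0 :: accLoop (cubeLoop n (n + 1).toNat 0) 0 : List Int) =
        (List.range' 0 (KM + 2)).map (fun i : Nat => accN i) := by
      rw [hcube, show (0 : Int) = accN 0 from rfl, accLoop_eq (KM + 1) 0]
      rw [show KM + 2 = KM + 1 + 1 by omega]
      simp [List.range'_succ]
    have hget : ∀ i : Int, 0 ≤ i → i ≤ M + 1 →
        PySem.List.pyGetD (0 :: accLoop (cubeLoop n (n + 1).toNat 0) 0) i 0 = accI i := by
      intro i hi1 hi2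
      rw [haccL, PySem.List.pyGetD_eq_getElem _ _ hi1 (by simp; omega)]
      simp
      rfl
    -- the dict keyed by accI (i+1)
    set RD : PySem.Dict Int Int :=
      List.foldl (fun d i => d.insert (accI (i + 1)) i) PySem.Dict.empty
        (PySem.List.pyRange 1 (M + 1) 1) with hRD
    have hdict :
        List.foldl (fun d i =>
            d.insert (PySem.List.pyGetD (0 :: accLoop (cubeLoop n (n + 1).toNat 0) 0) (i + 1) 0) i)
          PySem.Dict.empty (PySem.List.pyRange 1 (M + 1) 1) = RD := by
      rw [hRD]
      apply PySem.List.foldl_congr_mem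
      intro d i hi
      rw [PySem.List.mem_pyRange_one] at hi
      rw [hget (i + 1) (by omega) (by omega)]
    have hnodupmap :
        ((PySem.List.pyRange 1 (M + 1) 1).map (fun i : Int => accI (i + 1))).Nodup := by
      show List.Pairwise _ _
      rw [List.pairwise_map]
      apply List.Pairwise.imp_of_mem ?_ (PySem.List.pairwise_lt_pyRange_one 1 (M + 1))
      intro a b ha _ hab
      rw [PySem.List.mem_pyRange_one] at ha
      exact ne_of_lt (accI_strict (by omega) (by omega))
    have hitems : RD.items =
        (PySem.List.pyRange 1 (M + 1) 1).map (fun i : Int => (accI (i + 1), i)) := by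
      rw [hRD, PySem.Dict.items_foldl_insert_fresh _ (fun i : Int => accI (i + 1)) (fun i => i) _
        (by intro a _; exact PySem.Dict.contains_empty _) hnodupmap]
      simp
      rfl
    have hkeysnd : RD.keys.Nodup := by
      rw [hRD]
      exact PySem.Dict.nodup_keys_foldl_insert_key _ (fun i : Int => accI (i + 1))
        (fun _ i => i) _ (by simp)
    have hgetD : ∀ v : Int,
        (∃ r, 1 ≤ r ∧ r ≤ M ∧ accI (r + 1) = v ∧ RD.getD v (-1) = r) ∨
          (RD.getD v (-1) = -1 ∧ ∀ r : Int, 1 ≤ r → r ≤ M → accI (r + 1) ≠ v) := by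
      intro v
      by_cases hv : ∃ r : Int, 1 ≤ r ∧ r ≤ M ∧ accI (r + 1) = v
      · obtain ⟨r, hr1, hr2, hr3⟩ := hv
        left
        refine ⟨r, hr1, hr2, hr3, ?_⟩
        apply PySem.Dict.getD_of_mem_items _ ?_ hkeysnd
        rw [hitems, List.mem_map]
        exact ⟨r, by rw [PySem.List.mem_pyRange_one]; omega, by rw [hr3]⟩
      · push_neg at hv
        right
        refine ⟨?_, fun r h1 h2 => hv r h1 h2⟩
        apply PySem.Dict.getD_of_not_contains
        rw [PySem.Dict.contains_eq_decide_mem_keys]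
        simp only [decide_eq_false_iff_not]
        intro hvk
        simp only [PySem.Dict.keys, hitems, List.map_map, List.mem_map] at hvk
        obtain ⟨i, hi, hacc⟩ := hvk
        rw [PySem.List.mem_pyRange_one] at hi
        exact hv i (by omega) (by omega) hacc
    set g : Int → Int := fun l => RD.getD (accI l + n) (-1) with hg
    set ansList : List (Int × Int) :=
      ((PySem.List.pyRange 1 (M + 1 + 1) 1).filter (fun l => decide (g l ≠ -1))).map
        (fun l => (l, g l)) with hansdef
    -- A's output before the sort
    have hAeq : solve n = PySem.List.sorted2 ansList (·.1) (·.2) := by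
      simp only [solve]
      rw [hlen, hdict]
      have hcongr :
          List.foldl (fun (ans : List (Int × Int)) l =>
              if RD.getD (PySem.List.pyGetD (0 :: accLoop (cubeLoop n (n + 1).toNat 0) 0) l 0 + n) (-1) ≠ -1
              then ans ++ [(l, RD.getD (PySem.List.pyGetD (0 :: accLoop (cubeLoop n (n + 1).toNat 0) 0) l 0 + n) (-1))]
              else ans) [] (PySem.List.pyRange 1 (M + 1 + 1) 1) =
          List.foldl (fun (ans : List (Int × Int)) l =>
              if g l ≠ -1 then ans ++ [(l, g l)] else ans) [] (PySem.List.pyRange 1 (M + 1 + 1) 1) := by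
        apply PySem.List.foldl_congr_mem
        intro acc l hl
        rw [PySem.List.mem_pyRange_one] at hl
        rw [hget l (by omega) (by omega)]
      rw [hcongr, PySem.List.foldl_append_ite (fun l => g l ≠ -1) (fun l => (l, g l))]
      rw [List.nil_append, hansdef]
    -- membership characterization of A's list
    have hmemA : ∀ p : Int × Int, p ∈ ansList ↔ Ppair n p := by
      rintro ⟨a, b⟩
      rw [hansdef]
      simp only [List.mem_map, List.mem_filter, PySem.List.mem_pyRange_one,
        decide_eq_true_eq, Prod.mk.injEq, Ppair]
      constructor
      · rintro ⟨l, ⟨⟨hl1, hl2⟩, hlne⟩, hla, hlb⟩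
        rcases hgetD (accI l + n) with ⟨r, h1, h2, h3, h4⟩ | ⟨h4, _⟩
        · have hgl : g l = r := by rw [hg]; exact h4
          have hb : b = r := by rw [← hlb, hgl]
          have h3' : accI (b + 1) = accI a + n := by rw [hb, ← hla]; exact h3
          refine ⟨by omega, ?_, ?_, by omega⟩
          · by_contra hab
            push_neg at hab
            have := accI_mono (show b + 1 ≤ a by omega)
            omega
          · have h7 := cube_le_cube (show (0:Int) ≤ b by omega) (show b ≤ M by omega)
            omega
        · exfalso
          have hgl : g l = -1 := by rw [hg]; exact h4
          exact hlne (by rw [hgl])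
      · rintro ⟨hp1, hp2, hp3, hp4⟩
        have hbM : b ≤ M := by
          by_contra hgt
          push_neg at hgt
          have := cube_le_cube (show (0:Int) ≤ M + 1 by omega) (show M + 1 ≤ b by omega)
          omega
        rcases hgetD (accI a + n) with ⟨r, h1, h2, h3, h4⟩ | ⟨h4, hnone⟩
        · have hga : g a = r := by rw [hg]; exact h4
          have hrb : r = b := by
            have h5 : accI (r + 1) = accI (b + 1) := by omega
            have h6 := accI_inj (show (1:Int) ≤ r + 1 by omega) (show (1:Int) ≤ b + 1 by omega) h5
            omega
          exact ⟨a, ⟨⟨hp1, by omega⟩, by rw [hga]; omega⟩, rfl, by rw [hga, hrb]⟩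
        · exact absurd (show accI (b + 1) = accI a + n by omega) (hnone b (by omega) hbM)
    have hpwA : ansList.Pairwise (fun p q : Int × Int => p.1 < q.1) := by
      rw [hansdef, List.pairwise_map]
      exact (PySem.List.pairwise_lt_pyRange_one 1 (M + 1 + 1)).sublist List.filter_sublist
    have hAeq2 : solve n = ansList := by
      rw [hAeq, sorted2_fst_lt_eq_self _ hpwA]
    -- B's output
    have hBdef : solve_alt n = mainLoop n (PySem.List.pyRange 1 (M + 1) 1) 1 0 [] := by
      simp only [solve_alt]
      rw [← hMdef]
    obtain ⟨hmemB, hpwB⟩ := mainLoop_inv hM1 hM2 hM3 hn (KM + 1) 1 1 0 []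
      (by omega) (by omega) (by omega) (by omega) (by omega)
      (by simp [accI_one])
      (Or.inl rfl)
      (by
        intro p
        simp only [List.not_mem_nil, false_iff]
        rintro ⟨⟨q1, q2, _, _⟩, hlt⟩
        omega)
      List.Pairwise.nil
    have hpwB' : (mainLoop n (PySem.List.pyRange 1 (M + 1) 1) 1 0 []).Pairwise
        (fun p q : Int × Int => p.1 < q.1) :=
      List.Pairwise.imp_of_mem
        (fun {a b} ha hb hab => Ppair_cross ((hmemB a).mp ha) ((hmemB b).mp hb) hab) hpwB
    have hndA : ansList.Nodup :=
      hpwA.imp fun {a b} h => by intro he; rw [he] at h; exact lt_irrefl _ h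
    have hndB : (mainLoop n (PySem.List.pyRange 1 (M + 1) 1) 1 0 []).Nodup :=
      hpwB'.imp fun {a b} h => by intro he; rw [he] at h; exact lt_irrefl _ h
    have hperm : ansList.Perm (mainLoop n (PySem.List.pyRange 1 (M + 1) 1) 1 0 []) := by
      apply List.perm_of_nodup_nodup_toFinset_eq hndA hndB
      ext p
      simp only [List.mem_toFinset]
      rw [hmemA p, hmemB p]
    rw [hAeq2, hBdef]
    exact List.eq_of_perm_of_sorted
      (fun a b _ _ h1 h2 => absurd h2 (by omega)) hpwA hpwB' hperm
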